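-- pv_equiv track=rewrite | github.com/VahidHeidari/PathFollowing | path_following.py | CalcBoundingBoxs
-- ===== SOURCE A (Python) =====
-- def CalcBoundingBoxs(paths):
--     min_maxs = []
--     for segs in paths:
--         mn_x = min([ s[0] for s in segs ])
--         mx_x = max([ s[0] for s in segs ])
--         mn_y = min([ s[1] for s in segs ])
--         mx_y = max([ s[1] for s in segs ])
--         min_maxs.append((mn_x, mn_y, mx_x, mx_y))
--     return min_maxs
-- ===== SOURCE B (Python) =====
-- def CalcBoundingBoxs(paths):
--     out = []
--     for segs in paths:
--         mn_x = mx_x = segs[0][0]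
--         mn_y = mx_y = segs[0][1]
--         for (x, y) in segs[1:]:
--             if x < mn_x: mn_x = x
--             if x > mx_x: mx_x = x
--             if y < mn_y: mn_y = y
--             if y > mx_y: mx_y = y
--         out.append((mn_x, mn_y, mx_x, mx_y))
--     return out
-- ===== Notes on version B (the rewrite author's own statement) =====
-- stated objective: alternative
-- what changed: Replaces A's four separate min/max scans (each over a freshly built projection list) per path by one single pass over the path's remaining points that updates four running extrema seeded from the first point.
-- outside the precondition, e.g. on CalcBoundingBoxs([[]]): A raises ValueError, B raises IndexError
import Mathlib
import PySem

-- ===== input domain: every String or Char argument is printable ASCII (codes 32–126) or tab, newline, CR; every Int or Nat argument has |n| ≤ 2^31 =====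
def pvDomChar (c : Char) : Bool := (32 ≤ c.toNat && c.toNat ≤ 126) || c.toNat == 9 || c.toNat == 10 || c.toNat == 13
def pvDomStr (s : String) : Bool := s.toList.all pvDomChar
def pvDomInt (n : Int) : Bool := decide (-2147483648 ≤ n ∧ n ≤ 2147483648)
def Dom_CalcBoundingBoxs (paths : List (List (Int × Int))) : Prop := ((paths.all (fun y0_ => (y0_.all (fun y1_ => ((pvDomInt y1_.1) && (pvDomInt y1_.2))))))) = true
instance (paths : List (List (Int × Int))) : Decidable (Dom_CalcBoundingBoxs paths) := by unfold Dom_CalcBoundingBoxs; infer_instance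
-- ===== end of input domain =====

-- B replaces A's four separate min/max scans per path by one single pass tracking four running extrema (alternative decomposition, same asymptotic cost).
-- Pre_ excludes inputs containing an empty path, on which Python A raises ValueError (min of an empty list).


-- ===== PORT A =====
-- min([...]) / max([...]) are PySem.List.min?/max?; on an empty path they are none
-- (Python raises ValueError there) — Pre_ excludes that, .getD 0 is never reached inside Pre_.
def CalcBoundingBoxs (paths : List (List (Int × Int))) : List (Int × Int × Int × Int) :=
  paths.foldl (fun min_maxs segs =>
    let mn_x := (PySem.List.min? (segs.map (fun s => s.1)) (fun v => v)).getD 0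
    let mx_x := (PySem.List.max? (segs.map (fun s => s.1)) (fun v => v)).getD 0
    let mn_y := (PySem.List.min? (segs.map (fun s => s.2)) (fun v => v)).getD 0
    let mx_y := (PySem.List.max? (segs.map (fun s => s.2)) (fun v => v)).getD 0
    min_maxs ++ [(mn_x, mn_y, mx_x, mx_y)]) []

-- ===== PORT B =====
-- single pass per path: seed the four extrema from segs[0], update over segs[1:].
-- segs[0] on an empty path is an IndexError in Python B; Pre_ excludes that ([] branch unreachable inside Pre_).
def CalcBoundingBoxs_alt (paths : List (List (Int × Int))) : List (Int × Int × Int × Int) :=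
  paths.foldl (fun out segs =>
    match segs with
    | [] => out ++ [(0, 0, 0, 0)]
    | (x0, y0) :: rest =>
      let st := rest.foldl (fun (st : Int × Int × Int × Int) (p : Int × Int) =>
        let (mn_x, mx_x, mn_y, mx_y) := st
        let (x, y) := p
        let mn_x := if x < mn_x then x else mn_x
        let mx_x := if x > mx_x then x else mx_x
        let mn_y := if y < mn_y then y else mn_y
        let mx_y := if y > mx_y then y else mx_y
        (mn_x, mx_x, mn_y, mx_y)) (x0, x0, y0, y0)
      out ++ [(st.1, st.2.2.1, st.2.1, st.2.2.2)]) []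

-- ===== PRECONDITION & SPEC =====
-- Pre_ excludes paths containing an empty segment list: there Python A raises ValueError
-- (min of an empty list) and Python B raises IndexError (segs[0]).
def Pre_CalcBoundingBoxs (paths : List (List (Int × Int))) : Prop :=
  ∀ segs ∈ paths, segs ≠ []
instance (paths : List (List (Int × Int))) : Decidable (Pre_CalcBoundingBoxs paths) := by
  unfold Pre_CalcBoundingBoxs; infer_instance

def pvWitness_CalcBoundingBoxs : (List (List (Int × Int))) := [[(0, 1), (2, -3)], [(5, 5)]]

def Spec_CalcBoundingBoxs (paths : List (List (Int × Int))) (out : List (Int × Int × Int × Int)) : Prop := out = CalcBoundingBoxs_alt paths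
instance (paths : List (List (Int × Int))) (out : List (Int × Int × Int × Int)) : Decidable (Spec_CalcBoundingBoxs paths out) := by unfold Spec_CalcBoundingBoxs; infer_instance

-- ===== CLAIM (what is proved, stated in full; the proofs are below) =====
def Claim_equal_CalcBoundingBoxs : Prop := ∀ (paths : List (List (Int × Int))), Dom_CalcBoundingBoxs paths → Pre_CalcBoundingBoxs paths → Spec_CalcBoundingBoxs paths (CalcBoundingBoxs paths)

-- ===== LEMMAS AND PROOFS =====

-- the single-pass four-extrema fold computes the four separate running folds
theorem pvFold4Clean (rest : List (Int × Int)) (a b c d : Int) :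
    rest.foldl (fun (st : Int × Int × Int × Int) (p : Int × Int) =>
        (min st.1 p.1, max st.2.1 p.1, min st.2.2.1 p.2, max st.2.2.2 p.2)) (a, b, c, d)
    = ((rest.map (fun s => s.1)).foldl min a,
       (rest.map (fun s => s.1)).foldl max b,
       (rest.map (fun s => s.2)).foldl min c,
       (rest.map (fun s => s.2)).foldl max d) := by
  induction rest generalizing a b c d with
  | nil => rfl
  | cons p t ih => simp only [List.foldl_cons, List.map_cons, ih]

theorem pvFold4 (rest : List (Int × Int)) (a b c d : Int) :
    rest.foldl (fun (st : Int × Int × Int × Int) (p : Int × Int) =>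
        let (mn_x, mx_x, mn_y, mx_y) := st
        let (x, y) := p
        let mn_x := if x < mn_x then x else mn_x
        let mx_x := if x > mx_x then x else mx_x
        let mn_y := if y < mn_y then y else mn_y
        let mx_y := if y > mx_y then y else mx_y
        (mn_x, mx_x, mn_y, mx_y)) (a, b, c, d)
    = ((rest.map (fun s => s.1)).foldl min a,
       (rest.map (fun s => s.1)).foldl max b,
       (rest.map (fun s => s.2)).foldl min c,
       (rest.map (fun s => s.2)).foldl max d) := by
  have hf : (fun (st : Int × Int × Int × Int) (p : Int × Int) =>
        let (mn_x, mx_x, mn_y, mx_y) := st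
        let (x, y) := p
        let mn_x := if x < mn_x then x else mn_x
        let mx_x := if x > mx_x then x else mx_x
        let mn_y := if y < mn_y then y else mn_y
        let mx_y := if y > mx_y then y else mx_y
        (mn_x, mx_x, mn_y, mx_y))
      = (fun (st : Int × Int × Int × Int) (p : Int × Int) =>
        (min st.1 p.1, max st.2.1 p.1, min st.2.2.1 p.2, max st.2.2.2 p.2)) := by
    funext st p
    obtain ⟨a, b, c, d⟩ := st
    obtain ⟨x, y⟩ := p
    simp only [min_def, max_def]
    refine Prod.ext ?_ (Prod.ext ?_ (Prod.ext ?_ ?_)) <;> simp <;> split_ifs <;> omega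
  rw [hf]
  exact pvFold4Clean rest a b c d

-- ===== VERDICT (by name: the statement is the Claim_ definition above) =====
theorem CalcBoundingBoxs_spec : Claim_equal_CalcBoundingBoxs := by
  intro paths hd hpre
  clear hd
  unfold Spec_CalcBoundingBoxs CalcBoundingBoxs CalcBoundingBoxs_alt
  induction paths using List.reverseRecOn with
  | nil => rfl
  | append_singleton t segs ih =>
    have hpre' : Pre_CalcBoundingBoxs t := fun s hs => hpre s (List.mem_append_left _ hs)
    have hne : segs ≠ [] := hpre segs (List.mem_append_right _ (List.mem_singleton_self _))
    rw [List.foldl_append, List.foldl_append, ih hpre']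
    simp only [List.foldl_cons, List.foldl_nil]
    cases segs with
    | nil => exact absurd rfl hne
    | cons p rest =>
      obtain ⟨x0, y0⟩ := p
      simp only [List.map_cons] at *
      congr 1
      rw [pvFold4]
      simp [PySem.List.min?_id_cons, PySem.List.max?_id_cons]
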